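-- pv_equiv track=rewrite | github.com/TudorFCH/FP | Lab2/main.py | domino_teilf
-- ===== SOURCE A (Python) =====
-- def domino_teilf(list):
--     crt_subseq = [list[0]]
--     max_subseq = [list[0]]
--     for ch in range(1, len(list)):
--         crt_num = list[ch]
--         prev_num = list[ch - 1]
--         if prev_num%10 == int(crt_num/10):          #verifica daca cifra unitatilor unui element este egala
--             crt_subseq.append(list[ch])             #cu cifra zecilor urmatorului si le pune intr o noua lista
--         else:
--             crt_subseq = [list[ch]]
--         if len(crt_subseq) >= len(max_subseq):
--             max_subseq = crt_subseq
--     return max_subseq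
-- ===== SOURCE B (Python) =====
-- def domino_teilf(list):
--     # Pass 1: partition into maximal chaining runs.
--     runs = [[list[0]]]
--     for x in list[1:]:
--         if runs[-1][-1] % 10 == int(x / 10):
--             runs[-1].append(x)
--         else:
--             runs.append([x])
--     # Pass 2: pick the longest run, later run wins ties.
--     best = runs[0]
--     for r in runs[1:]:
--         if len(r) >= len(best):
--             best = r
--     return best
-- ===== Notes on version B (the rewrite author's own statement) =====
-- stated objective: alternative
-- what changed: B first partitions the list into the maximal chaining runs in one pass, then selects the longest run (last wins ties) in a separate reduction pass, instead of A's single interleaved scan that grows/resets a current subsequence while updating the maximum at every element.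
import Mathlib
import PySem

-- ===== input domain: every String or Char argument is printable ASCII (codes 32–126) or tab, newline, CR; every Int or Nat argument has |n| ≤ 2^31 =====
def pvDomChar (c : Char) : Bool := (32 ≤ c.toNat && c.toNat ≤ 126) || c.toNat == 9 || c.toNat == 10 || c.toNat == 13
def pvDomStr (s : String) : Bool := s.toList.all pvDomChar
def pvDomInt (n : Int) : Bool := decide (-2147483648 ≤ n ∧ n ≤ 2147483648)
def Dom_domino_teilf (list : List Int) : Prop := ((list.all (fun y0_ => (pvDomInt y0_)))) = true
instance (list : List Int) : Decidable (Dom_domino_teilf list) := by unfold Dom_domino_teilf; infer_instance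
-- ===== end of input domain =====

-- B partitions the list into the maximal chaining runs in one pass and then selects the
-- longest run (later run wins ties) in a separate reduction pass, instead of A's interleaved
-- grow/reset-and-update scan; objective: alternative decomposition, same O(n) cost.


-- ===== PORT A =====
-- loop body of A's for-loop over ch in range(1, len(list)), state = (crt_subseq, max_subseq).
-- int(crt_num/10) is PySem.Int.truncdiv crt_num 10 (exact here: |n| ≤ 2^31 < 2^53).
def stepA (list : List Int) (s : List Int × List Int) (ch : Int) : List Int × List Int :=
  let crt_num := (PySem.List.pyGet? list ch).getD 0
  let prev_num := (PySem.List.pyGet? list (ch - 1)).getD 0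
  let crt_subseq :=
    if PySem.Int.mod prev_num 10 = PySem.Int.truncdiv crt_num 10
    then s.1 ++ [crt_num] else [crt_num]
  let max_subseq := if s.2.length ≤ crt_subseq.length then crt_subseq else s.2
  (crt_subseq, max_subseq)

def domino_teilf (list : List Int) : List Int :=
  let h := (PySem.List.pyGet? list 0).getD 0   -- list[0]; Pre_ excludes [], where Python raises IndexError
  ((PySem.List.pyRange 1 (list.length : Int) 1).foldl (stepA list) ([h], [h])).2

-- ===== PORT B =====
-- loop body of B's pass 1: extend the last run or start a new one.
def stepB (runs : List (List Int)) (x : Int) : List (List Int) :=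
  if PySem.Int.mod ((runs.getLast?.getD []).getLast?.getD 0) 10 = PySem.Int.truncdiv x 10
  then runs.dropLast ++ [runs.getLast?.getD [] ++ [x]]   -- runs[-1].append(x)
  else runs ++ [[x]]                                     -- runs.append([x])

def domino_teilf_alt (list : List Int) : List Int :=
  let h := (PySem.List.pyGet? list 0).getD 0   -- list[0]; Pre_ excludes [], where Python raises IndexError
  let runs := (list.drop 1).foldl stepB [[h]]  -- pass 1 over list[1:]
  (runs.drop 1).foldl                          -- pass 2: for r in runs[1:]
    (fun best r => if best.length ≤ r.length then r else best)
    (runs.headD [])                            -- best = runs[0]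

-- ===== PRECONDITION & SPEC =====
-- Pre_ excludes only the empty list, on which Python A raises IndexError reading the first element.
def Pre_domino_teilf (list : List Int) : Prop := list ≠ []
instance (list : List Int) : Decidable (Pre_domino_teilf list) := by unfold Pre_domino_teilf; infer_instance
def pvWitness_domino_teilf : List Int := [12, 24, 45, 7]
def Spec_domino_teilf (list : List Int) (out : List Int) : Prop := out = domino_teilf_alt list
instance (list : List Int) (out : List Int) : Decidable (Spec_domino_teilf list out) := by unfold Spec_domino_teilf; infer_instance

-- ===== CLAIM (what is proved, stated in full; the proofs are below) =====
def Claim_equal_domino_teilf : Prop := ∀ (list : List Int), Dom_domino_teilf list → Pre_domino_teilf list → Spec_domino_teilf list (domino_teilf list)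

-- ===== LEMMAS AND PROOFS =====

-- A's loop re-expressed as structural recursion over the tail, carrying the previous element
def loopA (prev : Int) (crt mx : List Int) : List Int → List Int × List Int
  | [] => (crt, mx)
  | x :: xs =>
      let crt' := if PySem.Int.mod prev 10 = PySem.Int.truncdiv x 10 then crt ++ [x] else [x]
      let mx' := if mx.length ≤ crt'.length then crt' else mx
      loopA x crt' mx' xs

-- B's pass-2 reduction, as a function of a starting best and remaining runs
def bestSel (b : List Int) (rs : List (List Int)) : List Int :=
  rs.foldl (fun best r => if best.length ≤ r.length then r else best) b

lemma bestSel_snoc (b : List Int) (rs : List (List Int)) (r : List Int) :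
    bestSel b (rs ++ [r]) = if (bestSel b rs).length ≤ r.length then r else bestSel b rs := by
  simp [bestSel, List.foldl_append]

-- A's pyRange fold equals loopA, for any split of the list as pre ++ p :: l₂
lemma foldA (l₂ : List Int) : ∀ (pre : List Int) (p : Int) (s : List Int × List Int),
    ((PySem.List.pyRange ((pre.length : Int) + 1) (((pre ++ p :: l₂).length : Int)) 1).foldl
      (stepA (pre ++ p :: l₂)) s) = loopA p s.1 s.2 l₂ := by
  induction l₂ with
  | nil =>
    intro pre p s
    rw [PySem.List.pyRange_one_eq_nil (by simp only [List.length_append, List.length_cons, List.length_nil]; push_cast; omega)]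
    simp [loopA]
  | cons x xs ih =>
    intro pre p s
    rw [PySem.List.pyRange_one_cons (by simp only [List.length_append, List.length_cons]; push_cast; omega)]
    rw [List.foldl_cons]
    have hstep : stepA (pre ++ p :: x :: xs) s ((pre.length : Int) + 1) =
        (let crt' := if PySem.Int.mod p 10 = PySem.Int.truncdiv x 10 then s.1 ++ [x] else [x]
         let mx' := if s.2.length ≤ crt'.length then crt' else s.2
         (crt', mx')) := by
      have hx : PySem.List.pyGet? (pre ++ p :: x :: xs) ((pre.length : Int) + 1) = some x := by
        have : pre ++ p :: x :: xs = (pre ++ [p]) ++ x :: xs := by simp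
        rw [this]
        have := PySem.List.pyGet?_append_length (pre ++ [p]) xs x
        simpa using this
      have hp : PySem.List.pyGet? (pre ++ p :: x :: xs) ((pre.length : Int) + 1 - 1) = some p := by
        have h1 : ((pre.length : Int) + 1 - 1) = (pre.length : Int) := by ring
        rw [h1]
        exact PySem.List.pyGet?_append_length pre (x :: xs) p
      simp [stepA, hx]
    rw [hstep]
    have hassoc : pre ++ p :: x :: xs = (pre ++ [p]) ++ x :: xs := by simp
    have hlen : (pre.length : Int) + 1 + 1 = (((pre ++ [p]).length : Int) + 1) := by simp
    have := ih (pre ++ [p]) x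
      (let crt' := if PySem.Int.mod p 10 = PySem.Int.truncdiv x 10 then s.1 ++ [x] else [x]
       let mx' := if s.2.length ≤ crt'.length then crt' else s.2
       (crt', mx'))
    rw [hassoc, hlen]
    simpa [loopA] using this

-- pass 1 preserves: runs nonempty and every run nonempty
lemma foldB_ne_nil (xs : List Int) : ∀ (runs : List (List Int)), runs ≠ [] →
    (∀ r ∈ runs, r ≠ []) →
    xs.foldl stepB runs ≠ [] ∧ ∀ r ∈ xs.foldl stepB runs, r ≠ [] := by
  induction xs with
  | nil => intro runs h1 h2; exact ⟨h1, h2⟩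
  | cons x xs ih =>
    intro runs h1 h2
    rw [List.foldl_cons]
    apply ih
    · unfold stepB
      split <;> simp
    · intro r hr
      unfold stepB at hr
      split at hr <;> rw [List.mem_append] at hr
      · rcases hr with hr | hr
        · exact h2 r ((List.dropLast_sublist runs).subset hr)
        · simp at hr; simp [hr]
      · rcases hr with hr | hr
        · exact h2 r hr
        · simp at hr; simp [hr]

-- main invariant: A's running maximum is the best-so-far selection over B's runs
lemma mainInv (xs : List Int) : ∀ (acc : List (List Int)) (crt : List Int) (prev : Int)
    (b : List Int), crt.getLast? = some prev →
    (loopA prev crt (bestSel b (acc ++ [crt])) xs).2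
      = bestSel b (xs.foldl stepB (acc ++ [crt])) := by
  induction xs with
  | nil => intro acc crt prev b _; rfl
  | cons x xs ih =>
    intro acc crt prev b hlast
    rw [List.foldl_cons]
    have hstepB : stepB (acc ++ [crt]) x =
        if PySem.Int.mod prev 10 = PySem.Int.truncdiv x 10
        then acc ++ [crt ++ [x]] else (acc ++ [crt]) ++ [[x]] := by
      simp [stepB, hlast]
    rw [hstepB]
    by_cases hc : PySem.Int.mod prev 10 = PySem.Int.truncdiv x 10
    · rw [if_pos hc]
      simp only [loopA]
      rw [if_pos hc]
      have hmx : (if (bestSel b (acc ++ [crt])).length ≤ (crt ++ [x]).length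
            then crt ++ [x] else bestSel b (acc ++ [crt]))
          = bestSel b (acc ++ [crt ++ [x]]) := by
        rw [bestSel_snoc, bestSel_snoc]
        simp only [List.length_append, List.length_singleton]
        split_ifs <;> first | rfl | omega
      rw [hmx]
      exact ih acc (crt ++ [x]) x b (by simp)
    · rw [if_neg hc]
      simp only [loopA]
      rw [if_neg hc]
      have hmx : (if (bestSel b (acc ++ [crt])).length ≤ ([x] : List Int).length
            then [x] else bestSel b (acc ++ [crt]))
          = bestSel b ((acc ++ [crt]) ++ [[x]]) := by
        conv_rhs => rw [bestSel_snoc]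
      rw [hmx]
      exact ih (acc ++ [crt]) [x] x b (by simp)

-- ===== VERDICT (by name: the statement is the Claim_ definition above) =====
theorem domino_teilf_spec : Claim_equal_domino_teilf := by
  intro list _ hpre
  unfold Spec_domino_teilf
  match list, hpre with
  | a :: rest, _ =>
    unfold domino_teilf domino_teilf_alt
    simp only [PySem.List.pyGet?_zero_cons, Option.getD_some, List.drop_one, List.tail_cons]
    have hA : ((PySem.List.pyRange 1 ((a :: rest).length : Int) 1).foldl
        (stepA (a :: rest)) ([a], [a])).2 = (loopA a [a] [a] rest).2 := by
      have := foldA rest [] a ([a], [a])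
      simp only [List.nil_append, List.length_nil, Nat.cast_zero, zero_add] at this
      rw [this]
    rw [hA]
    have hmain := mainInv rest [] [a] a [a] (by simp)
    simp only [List.nil_append] at hmain
    have hb : bestSel [a] [[a]] = [a] := by simp [bestSel]
    rw [hb] at hmain
    rw [hmain]
    -- relate bestSel [a] runs with B's headD/drop formulation, using run nonemptiness
    obtain ⟨hne, hall⟩ := foldB_ne_nil rest [[a]] (by simp) (by simp)
    obtain ⟨r0, rs, hruns⟩ := List.exists_cons_of_ne_nil hne
    rw [hruns]
    have hr0 : r0 ≠ [] := hall r0 (by rw [hruns]; simp)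
    simp only [List.headD_cons, List.tail_cons]
    show bestSel [a] (r0 :: rs) = bestSel r0 rs
    unfold bestSel
    rw [List.foldl_cons]
    rw [if_pos (by have := List.length_pos_of_ne_nil hr0; simp only [List.length_singleton]; omega)]
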